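-- pv_equiv track=rewrite | github.com/Fer-DeLeon/parcialDeLeon | Parcial/Validaciones/Todas_validaciones.py | validar_legajo
-- ===== SOURCE A (Python) =====
-- def validar_legajo(cadena:int)-> bool:
--     """La funcion debe validar lo ingresado como legajo, siendo un numero de 5 digitos.
--     Args:
--     Recibe lo ingresado como legajo.
--     Return:
--     Si lo ingresado es un legajo valido o no (verdadero o falso)
--     """
--     es_legajo = False
--     contador_caracteres = 0
--
--     for i in range(len(cadena)):
--         if ord(cadena[i]) >= 48 and ord(cadena[i]) <= 57:
--             contador_caracteres += 1
--     if contador_caracteres == len(cadena) == 5: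
--         es_legajo = True
--     return es_legajo
-- ===== SOURCE B (Python) =====
-- import re
--
-- def validar_legajo(cadena: int) -> bool:
--     """Regex full-match: exactly five ASCII digits."""
--     return bool(re.fullmatch(r'[0-9]{5}', cadena))
-- ===== Notes on version B (the rewrite author's own statement) =====
-- stated objective: idiomatic
-- what changed: Replaced the manual per-character digit-counting loop and count==len==5 comparison with a single regex fullmatch of the pattern [0-9]{5}.
import Mathlib
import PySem

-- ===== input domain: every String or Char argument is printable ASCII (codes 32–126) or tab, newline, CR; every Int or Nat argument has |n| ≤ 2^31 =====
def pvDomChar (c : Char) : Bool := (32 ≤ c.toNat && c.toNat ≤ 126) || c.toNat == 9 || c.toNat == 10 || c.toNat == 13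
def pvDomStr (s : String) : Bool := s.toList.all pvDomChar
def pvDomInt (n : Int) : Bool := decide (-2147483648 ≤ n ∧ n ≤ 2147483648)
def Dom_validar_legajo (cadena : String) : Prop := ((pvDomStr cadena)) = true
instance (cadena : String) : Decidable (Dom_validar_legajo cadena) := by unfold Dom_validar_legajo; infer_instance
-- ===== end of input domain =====

-- B replaces A's digit-counting loop with a single regex fullmatch '[0-9]{5}' (idiomatic rewrite).


-- ===== PORT A =====
-- for i in range(len(cadena)): if 48 <= ord(cadena[i]) <= 57: contador += 1 ; then count == len == 5
def validar_legajo (cadena : String) : Bool :=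
  let contador_caracteres : Int :=
    (PySem.List.pyRange 0 (cadena.toList.length : Int) 1).foldl
      (fun acc i =>
        match PySem.Str.pyGet? cadena i with
        | some c => if 48 ≤ (c.toNat : Int) ∧ (c.toNat : Int) ≤ 57 then acc + 1 else acc
        | none => acc)
      0
  if contador_caracteres = (cadena.toList.length : Int) ∧ (cadena.toList.length : Int) = 5 then
    true
  else
    false

-- ===== PORT B =====
-- bool(re.fullmatch('[0-9]{5}', cadena)): the pattern matches the whole string iff it has
-- exactly five characters, each in the class '0'..'9' (exact for this regex on any string).
def validar_legajo_alt (cadena : String) : Bool :=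
  cadena.toList.length == 5 &&
    cadena.toList.all (fun c => 48 ≤ c.toNat && c.toNat ≤ 57)

-- ===== PRECONDITION & SPEC =====
def Spec_validar_legajo (cadena : String) (out : Bool) : Prop := out = validar_legajo_alt cadena
instance (cadena : String) (out : Bool) : Decidable (Spec_validar_legajo cadena out) := by unfold Spec_validar_legajo; infer_instance

-- ===== CLAIM (what is proved, stated in full; the proofs are below) =====
def Claim_equal_validar_legajo : Prop := ∀ (cadena : String), Dom_validar_legajo cadena → Spec_validar_legajo cadena (validar_legajo cadena)

-- ===== LEMMAS AND PROOFS =====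

-- A's loop counts exactly the digit characters of the string.
theorem pv_count_loop (l : List Char) :
    (PySem.List.pyRange 0 (l.length : Int) 1).foldl
      (fun acc i =>
        match PySem.List.pyGet? l i with
        | some c => if 48 ≤ (c.toNat : Int) ∧ (c.toNat : Int) ≤ 57 then acc + 1 else acc
        | none => acc)
      0
    = (l.countP (fun c => 48 ≤ c.toNat && c.toNat ≤ 57) : Int) := by
  have step :
      (PySem.List.pyRange 0 (l.length : Int) 1).foldl
        (fun acc i =>
          match PySem.List.pyGet? l i with
          | some c => if 48 ≤ (c.toNat : Int) ∧ (c.toNat : Int) ≤ 57 then acc + 1 else acc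
          | none => acc)
        (0 : Int)
      = (PySem.List.pyRange 0 (l.length : Int) 1).foldl
        (fun acc i => if (48 ≤ (PySem.List.pyGetD l i 'a').toNat ∧
                          (PySem.List.pyGetD l i 'a').toNat ≤ 57) then acc + 1 else acc)
        (0 : Int) := by
    apply PySem.List.foldl_congr_mem'
    intro i hi acc
    rw [PySem.List.mem_pyRange_one] at hi
    have h1 : PySem.List.pyGet? l i = some l[i.toNat] :=
      PySem.List.pyGet?_eq_some_getElem (xs := l) (i := i) hi.1 hi.2
    have h2 : PySem.List.pyGetD l i 'a' = l[i.toNat] :=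
      PySem.List.pyGetD_eq_getElem (xs := l) (i := i) (d := 'a') hi.1 hi.2
    have hiff : (48 ≤ ((l[i.toNat].toNat : Int)) ∧ ((l[i.toNat].toNat : Int)) ≤ 57) ↔
        (48 ≤ l[i.toNat].toNat ∧ l[i.toNat].toNat ≤ 57) := by omega
    simp only [h1, h2, hiff]
  refine step.trans ?_
  rw [PySem.List.foldl_pyRange_zero_pyGetD' l 'a'
      (f := fun acc c => if (48 ≤ c.toNat ∧ c.toNat ≤ 57) then acc + 1 else acc)]
  rw [PySem.List.foldl_ite_add_one]
  simp

-- ===== VERDICT (by name: the statement is the Claim_ definition above) =====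
theorem validar_legajo_spec : Claim_equal_validar_legajo := by
  intro cadena _
  unfold Spec_validar_legajo validar_legajo validar_legajo_alt
  simp only [PySem.Str.pyGet?, PySem.Chars.pyGet?_eq_listPyGet?]
  simp only [pv_count_loop cadena.toList]
  set l := cadena.toList
  have hcount : l.countP (fun c => 48 ≤ c.toNat && c.toNat ≤ 57) ≤ l.length :=
    List.countP_le_length
  by_cases hall : l.all (fun c => 48 ≤ c.toNat && c.toNat ≤ 57)
  · have : l.countP (fun c => 48 ≤ c.toNat && c.toNat ≤ 57) = l.length := by
      rw [List.countP_eq_length]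
      intro a ha; exact List.all_eq_true.mp hall a ha
    by_cases h5 : l.length = 5
    · simp [this, hall, h5]
    · have h5' : ¬ ((l.length : Int) = 5) := by omega
      simp [this, hall, h5, h5']
  · have hlt : l.countP (fun c => 48 ≤ c.toNat && c.toNat ≤ 57) < l.length := by
      rcases Nat.lt_or_ge (l.countP _) l.length with h | h
      · exact h
      · exfalso; apply hall
        rw [List.all_eq_true]
        intro a ha
        exact (List.countP_eq_length.mp (Nat.le_antisymm hcount h)) a ha
    have : ¬ ((l.countP (fun c => 48 ≤ c.toNat && c.toNat ≤ 57) : Int) = (l.length : Int) ∧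
              (l.length : Int) = 5) := by omega
    have hallf : (l.all fun c => decide (48 ≤ c.toNat) && decide (c.toNat ≤ 57)) = false :=
      Bool.eq_false_iff.mpr hall
    have hdec : ¬ (∀ a ∈ l, 48 ≤ a.toNat ∧ a.toNat ≤ 57) := by
      intro hforall
      exact absurd (List.all_eq_true.mpr (fun a ha => by simpa using hforall a ha)) hall
    simp [this, hallf, hdec]
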